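-- pv_equiv track=rewrite | github.com/BigBoySanchez/VexRiscv | scripts/rn1202_ref.py | _bd_act_nearest_idx
-- ===== SOURCE A (Python) =====
-- BD_DIALECT_TABLE: list[list[int]] = [
--     [0, 1, 2, 3, 4,  6, 11, 15],  # dialect  0
--     [0, 1, 2, 3, 4,  6,  9, 15],  # dialect  1
--     [0, 1, 2, 3, 4,  6, 11, 14],  # dialect  2
--     [0, 1, 2, 3, 4,  6,  9, 14],  # dialect  3
--     [0, 1, 2, 3, 4,  6, 10, 13],  # dialect  4
--     [0, 1, 2, 3, 4,  6,  8, 13],  # dialect  5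
--     [0, 1, 2, 3, 4,  6, 10, 12],  # dialect  6
--     [0, 1, 2, 3, 4,  6,  8, 12],  # dialect  7
--     [0, 1, 2, 3, 4,  6,  9, 11],  # dialect  8
--     [0, 1, 2, 3, 4,  6,  7, 11],  # dialect  9
--     [0, 1, 2, 3, 4,  6,  9, 10],  # dialect 10
--     [0, 1, 2, 3, 4,  6,  7, 10],  # dialect 11
--     [0, 1, 2, 3, 4,  6,  8,  9],  # dialect 12
--     [0, 1, 2, 3, 4,  6,  7,  9],  # dialect 13
--     [0, 1, 2, 3, 4,  6,  7,  8],  # dialect 14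
--     [0, 1, 2, 3, 4,  5,  6,  8],  # dialect 15
-- ]
--
-- def _bd_act_nearest_idx(target_hu: int, dialect_id: int) -> int:
--     """Find nearest index in a dialect for a half-unit target value.
--
--     Mirrors bd_act_nearest_idx() in bd_act.h (linear scan, first-wins on tie).
--     """
--     d = BD_DIALECT_TABLE[dialect_id]
--     best_i    = 0
--     best_dist = abs(target_hu - d[0])
--     for i in range(1, 8):
--         dist = abs(target_hu - d[i])
--         if dist < best_dist:
--             best_dist = dist
--             best_i    = i
--     return best_i
-- ===== SOURCE B (Python) =====
-- BD_DIALECT_TABLE: list[list[int]] = [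
--     [0, 1, 2, 3, 4,  6, 11, 15],
--     [0, 1, 2, 3, 4,  6,  9, 15],
--     [0, 1, 2, 3, 4,  6, 11, 14],
--     [0, 1, 2, 3, 4,  6,  9, 14],
--     [0, 1, 2, 3, 4,  6, 10, 13],
--     [0, 1, 2, 3, 4,  6,  8, 13],
--     [0, 1, 2, 3, 4,  6, 10, 12],
--     [0, 1, 2, 3, 4,  6,  8, 12],
--     [0, 1, 2, 3, 4,  6,  9, 11],
--     [0, 1, 2, 3, 4,  6,  7, 11],
--     [0, 1, 2, 3, 4,  6,  9, 10],
--     [0, 1, 2, 3, 4,  6,  7, 10],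
--     [0, 1, 2, 3, 4,  6,  8,  9],
--     [0, 1, 2, 3, 4,  6,  7,  9],
--     [0, 1, 2, 3, 4,  6,  7,  8],
--     [0, 1, 2, 3, 4,  5,  6,  8],
-- ]
--
-- def _bd_act_nearest_idx(target_hu: int, dialect_id: int) -> int:
--     """Binary-search the (strictly increasing) dialect row for the insertion
--     point of target_hu, then pick the nearer of the two neighbours; ties go
--     to the smaller index, which preserves the first-wins rule."""
--     d = BD_DIALECT_TABLE[dialect_id]
--     lo, hi = 0, 8
--     while lo < hi:
--         mid = (lo + hi) // 2
--         if d[mid] < target_hu: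
--             lo = mid + 1
--         else:
--             hi = mid
--     if lo == 0:
--         return 0
--     if lo == 8:
--         return 7
--     return lo if target_hu - d[lo - 1] > d[lo] - target_hu else lo - 1
-- ===== Notes on version B (the rewrite author's own statement) =====
-- stated objective: alternative
-- what changed: Replaces A's 8-step linear scan with running best index/distance by a binary search for the insertion point in the (strictly increasing) dialect row followed by a comparison of the two neighbouring candidates, with ties broken toward the smaller index to preserve A's first-wins rule.
import Mathlib
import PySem

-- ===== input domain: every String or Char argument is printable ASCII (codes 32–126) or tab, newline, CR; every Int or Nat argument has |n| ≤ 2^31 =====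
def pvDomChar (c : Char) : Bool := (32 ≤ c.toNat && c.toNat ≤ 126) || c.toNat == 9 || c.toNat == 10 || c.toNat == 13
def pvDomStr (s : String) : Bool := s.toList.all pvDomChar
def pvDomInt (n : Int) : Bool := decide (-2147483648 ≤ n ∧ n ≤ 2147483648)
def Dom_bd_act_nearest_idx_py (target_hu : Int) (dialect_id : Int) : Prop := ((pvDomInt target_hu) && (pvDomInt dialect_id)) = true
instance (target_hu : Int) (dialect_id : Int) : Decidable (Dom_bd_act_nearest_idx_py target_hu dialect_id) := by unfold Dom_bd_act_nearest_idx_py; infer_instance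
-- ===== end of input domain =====

-- B replaces A's 8-step linear scan by a binary search for the insertion point
-- followed by a two-neighbour comparison (objective: alternative/idiomatic).

def bdDialectTable : List (List Int) := [
  [0, 1, 2, 3, 4, 6, 11, 15],
  [0, 1, 2, 3, 4, 6, 9, 15],
  [0, 1, 2, 3, 4, 6, 11, 14],
  [0, 1, 2, 3, 4, 6, 9, 14],
  [0, 1, 2, 3, 4, 6, 10, 13],
  [0, 1, 2, 3, 4, 6, 8, 13],
  [0, 1, 2, 3, 4, 6, 10, 12],
  [0, 1, 2, 3, 4, 6, 8, 12],
  [0, 1, 2, 3, 4, 6, 9, 11],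
  [0, 1, 2, 3, 4, 6, 7, 11],
  [0, 1, 2, 3, 4, 6, 9, 10],
  [0, 1, 2, 3, 4, 6, 7, 10],
  [0, 1, 2, 3, 4, 6, 8, 9],
  [0, 1, 2, 3, 4, 6, 7, 9],
  [0, 1, 2, 3, 4, 6, 7, 8],
  [0, 1, 2, 3, 4, 5, 6, 8]]

-- Python's abs on int, ported step for step
def pyAbs (x : Int) : Int := if x < 0 then -x else x

-- ===== PORT A =====
-- A's `for i in range(1, 8)` loop over the state (best_i, best_dist); f i is the
-- loop body's `dist = abs(target_hu - d[i])`
def bdScan (f : Int → Int) (is : List Int) (st : Int × Int) : Int × Int :=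
  is.foldl (fun st i =>
    let dist := f i
    if dist < st.2 then (i, dist) else st) st

def bd_act_nearest_idx_py (target_hu : Int) (dialect_id : Int) : Int :=
  let d := (PySem.List.pyGet? bdDialectTable dialect_id).getD []
  (bdScan (fun i => pyAbs (target_hu - (PySem.List.pyGet? d i).getD 0))
    (PySem.List.pyRange 1 8 1)
    (0, pyAbs (target_hu - (PySem.List.pyGet? d 0).getD 0))).1

-- ===== PORT B =====
-- the `while lo < hi` bisection loop of Source B; the loop runs at most 4 times on
-- an 8-element row, the fuel (8) only makes the recursion structural
def bdBisect (d : List Int) (target_hu : Int) (fuel : Nat) (lo hi : Nat) : Nat :=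
  match fuel with
  | 0 => lo
  | fuel + 1 =>
    if lo < hi then
      let mid := (lo + hi) / 2
      if (PySem.List.pyGet? d (mid : Int)).getD 0 < target_hu then
        bdBisect d target_hu fuel (mid + 1) hi
      else
        bdBisect d target_hu fuel lo mid
    else lo

def bd_act_nearest_idx_py_alt (target_hu : Int) (dialect_id : Int) : Int :=
  let d := (PySem.List.pyGet? bdDialectTable dialect_id).getD []
  let lo := bdBisect d target_hu 8 0 8
  if lo = 0 then 0
  else if lo = 8 then 7
  else if target_hu - (PySem.List.pyGet? d ((lo : Int) - 1)).getD 0 >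
          (PySem.List.pyGet? d (lo : Int)).getD 0 - target_hu then (lo : Int)
  else (lo : Int) - 1

-- ===== PRECONDITION & SPEC =====
-- A raises IndexError unless -16 ≤ dialect_id < 16 (Python negative indexing wraps)
def Pre_bd_act_nearest_idx_py (target_hu : Int) (dialect_id : Int) : Prop :=
  -16 ≤ dialect_id ∧ dialect_id < 16
instance (target_hu : Int) (dialect_id : Int) : Decidable (Pre_bd_act_nearest_idx_py target_hu dialect_id) := by unfold Pre_bd_act_nearest_idx_py; infer_instance

def pvWitness_bd_act_nearest_idx_py : Int × Int := (5, 0)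

def Spec_bd_act_nearest_idx_py (target_hu : Int) (dialect_id : Int) (out : Int) : Prop := out = bd_act_nearest_idx_py_alt target_hu dialect_id
instance (target_hu : Int) (dialect_id : Int) (out : Int) : Decidable (Spec_bd_act_nearest_idx_py target_hu dialect_id out) := by unfold Spec_bd_act_nearest_idx_py; infer_instance

-- ===== CLAIM (what is proved, stated in full; the proofs are below) =====
def Claim_equal_bd_act_nearest_idx_py : Prop := ∀ (target_hu : Int) (dialect_id : Int), Dom_bd_act_nearest_idx_py target_hu dialect_id → Pre_bd_act_nearest_idx_py target_hu dialect_id → Spec_bd_act_nearest_idx_py target_hu dialect_id (bd_act_nearest_idx_py target_hu dialect_id)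

-- ===== LEMMAS AND PROOFS =====

theorem bdScan_nil (f : Int → Int) (st : Int × Int) : bdScan f [] st = st := rfl

theorem bdScan_cons_pos (f : Int → Int) (i : Int) (is : List Int) (st : Int × Int)
    (h : f i < st.2) : bdScan f (i :: is) st = bdScan f is (i, f i) := by
  simp [bdScan, h]

theorem bdScan_skip (f : Int → Int) : ∀ (is : List Int) (st : Int × Int),
    (∀ i ∈ is, ¬ f i < st.2) → bdScan f is st = st := by
  intro is
  induction is with
  | nil => intro st _; rfl
  | cons i is ih =>
    intro st h
    have hi : ¬ f i < st.2 := h i (by simp)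
    simp only [bdScan, List.foldl_cons, if_neg hi]
    exact ih st (fun j hj => h j (by simp [hj]))

theorem bdBisect_unroll (d : List Int) (t : Int) :
    bdBisect d t 8 0 8 =
    (if (PySem.List.pyGet? d 4).getD 0 < t then
       (if (PySem.List.pyGet? d 6).getD 0 < t then
          (if (PySem.List.pyGet? d 7).getD 0 < t then 8 else 7)
        else (if (PySem.List.pyGet? d 5).getD 0 < t then 6 else 5))
     else
       (if (PySem.List.pyGet? d 2).getD 0 < t then
          (if (PySem.List.pyGet? d 3).getD 0 < t then 4 else 3)
        else (if (PySem.List.pyGet? d 1).getD 0 < t then 2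
              else (if (PySem.List.pyGet? d 0).getD 0 < t then 1 else 0)))) := by
  simp [bdBisect]

theorem pyRange18 : PySem.List.pyRange 1 8 1 = [1, 2, 3, 4, 5, 6, 7] := by decide

-- every dialect row is strictly increasing, starts at 0 and stays ≤ 15
theorem bdRowFacts (did : Int) (h1 : -16 ≤ did) (h2 : did < 16) :
    (PySem.List.pyGet? ((PySem.List.pyGet? bdDialectTable did).getD []) 0).getD 0 = 0 ∧
    (PySem.List.pyGet? ((PySem.List.pyGet? bdDialectTable did).getD []) 0).getD 0 <
      (PySem.List.pyGet? ((PySem.List.pyGet? bdDialectTable did).getD []) 1).getD 0 ∧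
    (PySem.List.pyGet? ((PySem.List.pyGet? bdDialectTable did).getD []) 1).getD 0 <
      (PySem.List.pyGet? ((PySem.List.pyGet? bdDialectTable did).getD []) 2).getD 0 ∧
    (PySem.List.pyGet? ((PySem.List.pyGet? bdDialectTable did).getD []) 2).getD 0 <
      (PySem.List.pyGet? ((PySem.List.pyGet? bdDialectTable did).getD []) 3).getD 0 ∧
    (PySem.List.pyGet? ((PySem.List.pyGet? bdDialectTable did).getD []) 3).getD 0 <
      (PySem.List.pyGet? ((PySem.List.pyGet? bdDialectTable did).getD []) 4).getD 0 ∧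
    (PySem.List.pyGet? ((PySem.List.pyGet? bdDialectTable did).getD []) 4).getD 0 <
      (PySem.List.pyGet? ((PySem.List.pyGet? bdDialectTable did).getD []) 5).getD 0 ∧
    (PySem.List.pyGet? ((PySem.List.pyGet? bdDialectTable did).getD []) 5).getD 0 <
      (PySem.List.pyGet? ((PySem.List.pyGet? bdDialectTable did).getD []) 6).getD 0 ∧
    (PySem.List.pyGet? ((PySem.List.pyGet? bdDialectTable did).getD []) 6).getD 0 <
      (PySem.List.pyGet? ((PySem.List.pyGet? bdDialectTable did).getD []) 7).getD 0 ∧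
    (PySem.List.pyGet? ((PySem.List.pyGet? bdDialectTable did).getD []) 7).getD 0 ≤ 15 := by
  interval_cases did <;> decide

-- ===== VERDICT (by name: the statement is the Claim_ definition above) =====
theorem bd_act_nearest_idx_py_spec : Claim_equal_bd_act_nearest_idx_py := by
  intro t did hdom hpre
  clear hdom
  unfold Spec_bd_act_nearest_idx_py
  obtain ⟨h1, h2⟩ := hpre
  obtain ⟨g0, g01, g12, g23, g34, g45, g56, g67, g7⟩ := bdRowFacts did h1 h2
  by_cases hlow : t ≤ 0
  · -- the distances d[i] - t only grow with i: the scan never updates and A returns 0,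
    -- and no row element is < t so the bisection returns 0 as well
    simp only [bd_act_nearest_idx_py, bd_act_nearest_idx_py_alt]
    rw [pyRange18, bdScan_skip _ _ _ (by
      intro i hi
      simp only [List.mem_cons, List.not_mem_nil, or_false] at hi
      rcases hi with rfl | rfl | rfl | rfl | rfl | rfl | rfl <;>
        · simp only [pyAbs]
          split_ifs <;> omega)]
    rw [bdBisect_unroll]
    norm_num [pyAbs]
    split_ifs <;> omega
  · by_cases hhigh : 15 ≤ t
    · -- the distances t - d[i] strictly shrink with i: every scan step updates and A
      -- returns 7; every row element is ≤ t so the bisection lands at the right end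
      simp only [bd_act_nearest_idx_py, bd_act_nearest_idx_py_alt]
      rw [pyRange18,
        bdScan_cons_pos _ _ _ _ (by simp only [pyAbs]; split_ifs <;> omega),
        bdScan_cons_pos _ _ _ _ (by simp only [pyAbs]; split_ifs <;> omega),
        bdScan_cons_pos _ _ _ _ (by simp only [pyAbs]; split_ifs <;> omega),
        bdScan_cons_pos _ _ _ _ (by simp only [pyAbs]; split_ifs <;> omega),
        bdScan_cons_pos _ _ _ _ (by simp only [pyAbs]; split_ifs <;> omega),
        bdScan_cons_pos _ _ _ _ (by simp only [pyAbs]; split_ifs <;> omega),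
        bdScan_cons_pos _ _ _ _ (by simp only [pyAbs]; split_ifs <;> omega),
        bdScan_nil, bdBisect_unroll]
      norm_num
      split_ifs <;> (try exact False.elim ‹False›) <;>
        (try simp only [Int.reduceSub] at *) <;> (try omega)
      all_goals exact absurd True.intro ‹¬True›
    · -- 1 ≤ t ≤ 14: finitely many inputs, evaluate both ports
      have ht1 : 1 ≤ t := by omega
      have ht2 : t ≤ 14 := by omega
      clear g0 g01 g12 g23 g34 g45 g56 g67 g7 hlow hhigh
      interval_cases t <;> interval_cases did <;> decide
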